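/- GENERATED by c/gen_code.py from toy.elf, the PROGRAM only (the base is in the shared library): where each function is linked. -/
import X86.Derived.User.State
namespace Toy.Code
open X86

def addr_prog_main : Word := 0x105000
def addr_clamp_length : Word := 0x105180
def addr_weighted_sum : Word := 0x105220
def addr_store_sum : Word := 0x105320
def addr_fill_buffer : Word := 0x105400
def addr__sub_I_65535_1 : Word := 0x1054c0

/-- Every function: name, address, size in bytes. -/
def functions : List (String × Word × Nat) :=
  [ ("prog_main", 0x105000, 188)
  , ("clamp_length", 0x105180, 27)
  , ("weighted_sum", 0x105220, 98)
  , ("store_sum", 0x105320, 69)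
  , ("fill_buffer", 0x105400, 48)
  , ("_sub_I_65535_1", 0x1054c0, 24) ]

end Toy.Code
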